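-- pv_equiv track=rewrite | github.com/BugTraceAI/BugTraceAI-CLI | bugtrace/tools/waf/encodings.py | _case_mixing
-- ===== SOURCE A (Python) =====
-- def _case_mixing(payload: str) -> str:
--     """
--     Random case mixing.
--     <script> -> <ScRiPt>
--     """
--     import random
--     result = ""
--     for i, char in enumerate(payload):
--         if char.isalpha():
--             result += char.upper() if i % 2 == 0 else char.lower()
--         else:
--             result += char
--     return result
-- ===== SOURCE B (Python) =====
-- def _case_mixing(payload: str) -> str:
--     """Pairwise two-at-a-time pass: uppercase the first of each pair, lowercase the second."""
--     import random
--     out = []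
--     i = 0
--     n = len(payload)
--     while i + 1 < n:
--         a, b = payload[i], payload[i + 1]
--         out.append(a.upper() if a.isalpha() else a)
--         out.append(b.lower() if b.isalpha() else b)
--         i += 2
--     if i < n:
--         a = payload[i]
--         out.append(a.upper() if a.isalpha() else a)
--     return "".join(out)
-- ===== Notes on version B (the rewrite author's own statement) =====
-- stated objective: alternative
-- what changed: Replaces the enumerate loop with per-character i%2 parity tests and incremental string += by a two-characters-per-step pairwise pass (uppercase the first of each pair, lowercase the second) collecting into a list joined once; no index or parity test remains.
import Mathlib
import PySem

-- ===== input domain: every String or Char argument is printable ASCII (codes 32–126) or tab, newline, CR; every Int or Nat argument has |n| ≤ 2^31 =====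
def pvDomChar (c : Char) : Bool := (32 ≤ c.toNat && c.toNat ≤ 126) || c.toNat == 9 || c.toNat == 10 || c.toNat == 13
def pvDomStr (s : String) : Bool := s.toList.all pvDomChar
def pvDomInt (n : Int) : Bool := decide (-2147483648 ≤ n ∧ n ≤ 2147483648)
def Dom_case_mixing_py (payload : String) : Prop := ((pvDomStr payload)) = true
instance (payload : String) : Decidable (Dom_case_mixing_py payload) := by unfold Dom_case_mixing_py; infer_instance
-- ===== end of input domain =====

-- B replaces A's indexed loop with i%2 parity tests and char-by-char string += by a
-- two-characters-per-step pairwise pass joined once (alternative decomposition, same values).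

-- ===== PORT A =====
-- literal port of A: fold over enumerate(payload), branch per char, string built by +=
def case_mixing_py (payload : String) : String :=
  String.ofList
    ((PySem.List.enumerate payload.toList 0).foldl
      (fun result ic =>
        if PySem.Chars.isalpha ic.2 then
          result ++ [if PySem.Int.mod ic.1 2 = 0 then PySem.Chars.upperChar ic.2
                     else PySem.Chars.lowerChar ic.2]
        else result ++ [ic.2])
      [])

-- ===== PORT B =====
def pvUp (c : Char) : Char := if PySem.Chars.isalpha c then PySem.Chars.upperChar c else c
def pvLow (c : Char) : Char := if PySem.Chars.isalpha c then PySem.Chars.lowerChar c else c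

-- two characters per step, leftover char handled in the [a] case (Source B's while loop)
def pvMixGo : List Char → List Char
  | [] => []
  | [a] => [pvUp a]
  | a :: b :: rest => pvUp a :: pvLow b :: pvMixGo rest

def case_mixing_py_alt (payload : String) : String :=
  String.ofList (pvMixGo payload.toList)

-- ===== PRECONDITION & SPEC =====
def Spec_case_mixing_py (payload : String) (out : String) : Prop := out = case_mixing_py_alt payload
instance (payload : String) (out : String) : Decidable (Spec_case_mixing_py payload out) := by unfold Spec_case_mixing_py; infer_instance

-- ===== CLAIM (what is proved, stated in full; the proofs are below) =====
def Claim_equal_case_mixing_py : Prop := ∀ (payload : String), Dom_case_mixing_py payload → Spec_case_mixing_py payload (case_mixing_py payload)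

-- ===== LEMMAS AND PROOFS =====

theorem pvFold_eq_go (cs : List Char) : ∀ (acc : List Char) (s : Int), 0 ≤ s → PySem.Int.mod s 2 = 0 →
    (PySem.List.enumerate cs s).foldl
      (fun result ic =>
        if PySem.Chars.isalpha ic.2 then
          result ++ [if PySem.Int.mod ic.1 2 = 0 then PySem.Chars.upperChar ic.2
                     else PySem.Chars.lowerChar ic.2]
        else result ++ [ic.2])
      acc = acc ++ pvMixGo cs := by
  induction cs using pvMixGo.induct with
  | case1 => intro acc s _ _; simp [PySem.List.enumerate, pvMixGo]
  | case2 a =>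
      intro acc s hs hmod
      simp at hmod
      simp [PySem.List.enumerate, pvMixGo, pvUp, hmod]
      by_cases h : PySem.Chars.isalpha a <;> simp [h]
  | case3 a b rest ih =>
      intro acc s hs hmod
      simp at hmod
      have h1 : ¬ (2 ∣ (s + 1)) := by omega
      have h2 : PySem.Int.mod (s + 1 + 1) 2 = 0 := by simp; omega
      rw [PySem.List.enumerate_cons, PySem.List.enumerate_cons]
      simp only [List.foldl_cons]
      rw [ih _ (s + 1 + 1) (by omega) h2]
      simp [pvMixGo, pvUp, pvLow, hmod, h1]
      by_cases ha : PySem.Chars.isalpha a <;> by_cases hb : PySem.Chars.isalpha b <;>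
        simp [ha, hb]

-- ===== VERDICT (by name: the statement is the Claim_ definition above) =====
theorem case_mixing_py_spec : Claim_equal_case_mixing_py := by
  intro payload _
  unfold Spec_case_mixing_py case_mixing_py case_mixing_py_alt
  rw [pvFold_eq_go payload.toList [] 0 le_rfl (by simp)]
  rfl
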